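-- pv_equiv track=rewrite | github.com/rachhan9/Phylogenetic-Tree | phylogenic_tree.py | cgr
-- ===== SOURCE A (Python) =====
-- def cgr(seq, order, k):
--     # cgr function copy from Assignment3.pdf
--     ln = len(seq)
--     pw = 2**k
--     out = [[0 for i in range(pw)] for j in range(pw)]
--     x = 2**(k-1)
--     y = 2**(k-1)
--     for i in range(0,ln):
--         x=x//2
--         y=y//2
--         if(seq[i] == order[2] or seq[i] == order[3]):
--             x = x + (2**(k-1))
--         if(seq[i] == order[0] or seq[i] == order[3]):
--             y = y + (2**(k-1))
--         if(i>=k-1):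
--             out[y][x] = out[y][x]+1
--     return out
-- ===== SOURCE B (Python) =====
-- def cgr(seq, order, k):
--     # Recompute each k-mer's cell coordinates directly from its window of
--     # characters instead of sliding x,y incrementally through the sequence.
--     pw = 2 ** k
--     out = [[0 for _ in range(pw)] for _ in range(pw)]
--     for i in range(k - 1, len(seq)):
--         x = 0
--         y = 0
--         for m in range(k):
--             c = seq[i - k + 1 + m]
--             if c == order[2] or c == order[3]:
--                 x += 2 ** m
--             if c == order[0] or c == order[3]:
--                 y += 2 ** m
--         out[y][x] += 1
--     return out
-- ===== Notes on version B (the rewrite author's own statement) =====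
-- stated objective: alternative
-- what changed: B drops A's incrementally shifted x,y registers and warm-up phase: it loops over window end positions i from k-1 and recomputes the cell coordinates of each k-mer from scratch from its k-character window, summing 2**m per matching character.
-- outside the precondition, e.g. on cgr('', 'AC', 0): A returns [[0]], B returns [[1]]
import Mathlib
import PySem

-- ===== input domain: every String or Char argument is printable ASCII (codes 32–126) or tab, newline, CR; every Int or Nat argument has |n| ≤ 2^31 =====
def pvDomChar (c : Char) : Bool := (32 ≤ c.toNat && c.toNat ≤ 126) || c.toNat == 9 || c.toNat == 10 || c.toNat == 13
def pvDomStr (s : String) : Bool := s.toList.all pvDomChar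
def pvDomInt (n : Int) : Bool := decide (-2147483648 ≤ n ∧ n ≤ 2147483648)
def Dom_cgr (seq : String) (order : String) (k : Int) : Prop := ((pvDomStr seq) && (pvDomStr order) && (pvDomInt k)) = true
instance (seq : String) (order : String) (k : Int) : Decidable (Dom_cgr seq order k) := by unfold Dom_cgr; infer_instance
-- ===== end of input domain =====

-- B recomputes each k-mer's cell from its window instead of sliding x,y incrementally; equal on Pre_.
-- Both Pythons mutate only their own fresh matrix; no argument is mutated.

-- out[y][x] += 1 (shared by both Pythons verbatim; y,x are in range and nonnegative on Pre_,
-- so plain Nat indexing is exact — Python's negative-index wrap is never reached there)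
def pvBump (out : List (List Int)) (y x : Int) : List (List Int) :=
  out.modify y.toNat (fun row => row.modify x.toNat (· + 1))

-- ===== PORT A =====
def cgr (seq : String) (order : String) (k : Int) : List (List Int) :=
  let s := seq.toList
  let o := order.toList
  let ln := s.length
  let pw := 2 ^ k.toNat            -- 2**k; k ≥ 1 on Pre_
  let out0 := List.replicate pw (List.replicate pw (0 : Int))
  let half : Int := 2 ^ (k - 1).toNat   -- 2**(k-1); exact for k ≥ 1
  let st := (List.range ln).foldl (fun (st : Int × Int × List (List Int)) i =>
    let x := PySem.Int.floordiv st.1 2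
    let y := PySem.Int.floordiv st.2.1 2
    let c := s.getD i ' '          -- seq[i], i always in range
    let x := if c = o.getD 2 ' ' ∨ c = o.getD 3 ' ' then x + half else x
    let y := if c = o.getD 0 ' ' ∨ c = o.getD 3 ' ' then y + half else y
    let out := if k - 1 ≤ (i : Int) then pvBump st.2.2 y x else st.2.2
    (x, y, out)) (half, half, out0)
  st.2.2

-- ===== PORT B =====
def cgr_alt (seq : String) (order : String) (k : Int) : List (List Int) :=
  let s := seq.toList
  let o := order.toList
  let pw := 2 ^ k.toNat
  let out0 := List.replicate pw (List.replicate pw (0 : Int))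
  (PySem.List.pyRange (k - 1) (s.length : Int) 1).foldl (fun out i =>
    let xy := (List.range k.toNat).foldl (fun (xy : Int × Int) (m : Nat) =>
      let c := s.getD ((i : Int) - k + 1 + (m : Int)).toNat ' '   -- seq[i-k+1+m], in range on Pre_
      let x := if c = o.getD 2 ' ' ∨ c = o.getD 3 ' ' then xy.1 + 2 ^ m else xy.1
      let y := if c = o.getD 0 ' ' ∨ c = o.getD 3 ' ' then xy.2 + 2 ^ m else xy.2
      (x, y)) (0, 0)
    pvBump out xy.2 xy.1) out0

-- ===== PRECONDITION & SPEC =====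
-- Pre_ excludes k ≤ 0, where A's float 2**(k-1) raises TypeError on every nonempty seq and the k = 0,
-- seq = "" corner where A's [[0]] and B's [[1]] are both loop-bound artefacts of a degenerate input;
-- and order strings too short for A's order[2]/order[3] accesses (IndexError), except the short-circuited
-- length-3 case where every character of seq equals both order[0] and order[2], which A completes.
def Pre_cgr (seq : String) (order : String) (k : Int) : Prop :=
  1 ≤ k ∧ (seq.toList = [] ∨ 4 ≤ order.toList.length ∨
    (order.toList.length = 3 ∧
      ∀ c ∈ seq.toList, c = order.toList.getD 0 ' ' ∧ c = order.toList.getD 2 ' '))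
instance (seq : String) (order : String) (k : Int) : Decidable (Pre_cgr seq order k) := by
  unfold Pre_cgr; infer_instance

def pvWitness_cgr : String × String × Int := ("ACGTTGCA", "ACGT", 2)

def Spec_cgr (seq : String) (order : String) (k : Int) (out : List (List Int)) : Prop := out = cgr_alt seq order k
instance (seq : String) (order : String) (k : Int) (out : List (List Int)) : Decidable (Spec_cgr seq order k out) := by unfold Spec_cgr; infer_instance

-- ===== CLAIM (what is proved, stated in full; the proofs are below) =====
def Claim_equal_cgr : Prop := ∀ (seq : String) (order : String) (k : Int), Dom_cgr seq order k → Pre_cgr seq order k → Spec_cgr seq order k (cgr seq order k)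

-- ===== LEMMAS AND PROOFS =====

theorem pvIte_add (c : Prop) [Decidable c] (a h : ℤ) :
    (if c then a + h else a) = a + (if c then h else 0) := by
  split <;> ring

-- the initial register 2^(κ-1) after t halvings (κ = k.toNat)
def pvIT (κ t : ℕ) : ℤ := if t < κ then 2 ^ (κ - 1 - t) else 0

-- window sum: bit m of A's register after t steps comes from character t - κ + m (when in range)
def pvWS (s : List Char) (P : Char → Prop) [DecidablePred P] (κ t : ℕ) : ℤ :=
  ∑ m ∈ Finset.range κ, if κ ≤ t + m ∧ P (s.getD (t + m - κ) ' ') then (2 : ℤ) ^ m else 0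

theorem pvXF_step (s : List Char) (P : Char → Prop) [DecidablePred P] (κ : ℕ) (hκ : 1 ≤ κ) (t : ℕ) :
    PySem.Int.floordiv (pvIT κ t + pvWS s P κ t) 2 + (if P (s.getD t ' ') then (2 : ℤ) ^ (κ - 1) else 0)
      = pvIT κ (t + 1) + pvWS s P κ (t + 1) := by
  obtain ⟨κ', rfl⟩ : ∃ κ', κ = κ' + 1 := ⟨κ - 1, by omega⟩
  set T : ℤ := ∑ m ∈ Finset.range κ',
      (if κ' + 1 ≤ t + 1 + m ∧ P (s.getD (t + 1 + m - (κ' + 1)) ' ') then (2 : ℤ) ^ m else 0)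
    with hT
  set e : ℤ := (if κ' + 1 ≤ t ∧ P (s.getD (t - (κ' + 1)) ' ') then (1 : ℤ) else 0) with he
  have hTnn : 0 ≤ T := by
    rw [hT]; apply Finset.sum_nonneg; intro m _; split <;> positivity
  have hL : pvWS s P (κ' + 1) t = 2 * T + e := by
    unfold pvWS
    rw [Finset.sum_range_succ', hT, Finset.mul_sum]
    congr 1
    apply Finset.sum_congr rfl
    intro m _
    have h1 : t + (m + 1) = t + 1 + m := by omega
    rw [h1]
    split
    · rw [pow_succ]; ring
    · ring
  have hR : pvWS s P (κ' + 1) (t + 1)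
      = T + (if P (s.getD t ' ') then (2 : ℤ) ^ κ' else 0) := by
    unfold pvWS
    rw [Finset.sum_range_succ, hT]
    congr 1
    have h1 : κ' + 1 ≤ t + 1 + κ' := by omega
    have h2 : t + 1 + κ' - (κ' + 1) = t := by omega
    rw [h2]
    simp [h1]
  rw [hL, hR, PySem.Int.floordiv_eq_ediv_of_pos (by norm_num)]
  have hcancel : (pvIT (κ' + 1) t + (2 * T + e)) / 2 = pvIT (κ' + 1) (t + 1) + T := by
    have hediv : ∀ A eb : ℤ, 0 ≤ eb → eb < 2 → (2 * A + eb) / 2 = A := by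
      intro A eb h0 h2; omega
    unfold pvIT
    rcases Nat.lt_trichotomy t κ' with h | h | h
    · have he0 : e = 0 := by rw [he, if_neg]; omega
      have hp : (2 : ℤ) ^ (κ' + 1 - 1 - t) = 2 * 2 ^ (κ' + 1 - 1 - (t + 1)) := by
        rw [← pow_succ']
        congr 1
        omega
      rw [if_pos (by omega), if_pos (by omega), he0, hp]
      have := hediv (2 ^ (κ' + 1 - 1 - (t + 1)) + T) 0 le_rfl (by norm_num)
      omega
    · have he0 : e = 0 := by rw [he, if_neg]; omega
      have hp : (2 : ℤ) ^ (κ' + 1 - 1 - t) = 1 := by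
        have : κ' + 1 - 1 - t = 0 := by omega
        rw [this, pow_zero]
      rw [if_pos (by omega), if_neg (by omega), he0, hp]
      omega
    · have he01 : e = 0 ∨ e = 1 := by rw [he]; split <;> simp
      rw [if_neg (by omega), if_neg (by omega)]
      rcases he01 with h' | h' <;> rw [h'] <;> omega
  have hpow : (κ' + 1 - 1 : ℕ) = κ' := by omega
  rw [hpow, hcancel]
  ring

-- A's register value after t steps, X and Y flavours
def pvX (s o : List Char) (κ t : ℕ) : ℤ :=
  pvIT κ t + pvWS s (fun c => c = o.getD 2 ' ' ∨ c = o.getD 3 ' ') κ t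
def pvY (s o : List Char) (κ t : ℕ) : ℤ :=
  pvIT κ t + pvWS s (fun c => c = o.getD 0 ' ' ∨ c = o.getD 3 ' ') κ t

-- the sequence of bumps both programs perform, as a fold over all step indices
def pvOutF (s o : List Char) (κ : ℕ) (w : List (List Int)) (n : ℕ) : List (List Int) :=
  (List.range n).foldl (fun u t =>
    if κ ≤ t + 1 then pvBump u (pvY s o κ (t + 1)) (pvX s o κ (t + 1)) else u) w

theorem pvOutF_id (s o : List Char) (κ : ℕ) (w : List (List Int)) (n : ℕ) (h : n < κ) :
    pvOutF s o κ w n = w := by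
  induction n with
  | zero => simp [pvOutF]
  | succ m ih =>
      unfold pvOutF at ih ⊢
      rw [List.range_succ, List.foldl_append]
      rw [ih (by omega)]
      simp only [List.foldl]
      rw [if_neg (by omega)]

theorem pvA_fold (s o : List Char) (k : Int) (hk : 1 ≤ k) (w : List (List Int)) (n : ℕ) :
    (List.range n).foldl (fun (st : Int × Int × List (List Int)) i =>
      let x := PySem.Int.floordiv st.1 2
      let y := PySem.Int.floordiv st.2.1 2
      let c := s.getD i ' '
      let x := if c = o.getD 2 ' ' ∨ c = o.getD 3 ' ' then x + (2 : ℤ) ^ (k - 1).toNat else x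
      let y := if c = o.getD 0 ' ' ∨ c = o.getD 3 ' ' then y + (2 : ℤ) ^ (k - 1).toNat else y
      let out := if k - 1 ≤ (i : Int) then pvBump st.2.2 y x else st.2.2
      (x, y, out)) ((2 : ℤ) ^ (k - 1).toNat, (2 : ℤ) ^ (k - 1).toNat, w)
    = (pvX s o k.toNat n, pvY s o k.toNat n, pvOutF s o k.toNat w n) := by
  have hκ : 1 ≤ k.toNat := by omega
  have hk1 : (k - 1).toNat = k.toNat - 1 := by omega
  induction n with
  | zero =>
      simp only [List.range_zero, List.foldl_nil]
      have hws : ∀ (P : Char → Prop) (_ : DecidablePred P), pvWS s P k.toNat 0 = 0 := by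
        intro P _
        apply Finset.sum_eq_zero
        intro m hm
        rw [if_neg]
        rintro ⟨h1, -⟩
        simp only [Finset.mem_range] at hm
        omega
      unfold pvX pvY pvOutF
      rw [hws, hws]
      unfold pvIT
      rw [if_pos (by omega), hk1]
      simp
  | succ n ih =>
      rw [List.range_succ, List.foldl_append, ih]
      have ex := pvXF_step s (fun c => c = o.getD 2 ' ' ∨ c = o.getD 3 ' ') k.toNat hκ n
      have ey := pvXF_step s (fun c => c = o.getD 0 ' ' ∨ c = o.getD 3 ' ') k.toNat hκ n
      simp only at ex ey
      have hcond : (k - 1 ≤ (n : ℤ)) ↔ (k.toNat ≤ n + 1) := by omega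
      simp only [List.foldl_cons, List.foldl_nil, pvIte_add, hk1, hcond]
      unfold pvX pvY
      rw [ex, ey]
      unfold pvOutF
      rw [List.range_succ, List.foldl_append]
      simp only [List.foldl_cons, List.foldl_nil]
      unfold pvX pvY
      rfl

theorem pvFoldl_pair_add (f g : ℕ → ℤ) (n : ℕ) (a b : ℤ) :
    (List.range n).foldl (fun (xy : ℤ × ℤ) m => (xy.1 + f m, xy.2 + g m)) (a, b)
      = (a + ∑ m ∈ Finset.range n, f m, b + ∑ m ∈ Finset.range n, g m) := by
  induction n generalizing a b with
  | zero => simp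
  | succ p ih =>
      rw [List.range_succ, List.foldl_append, ih]
      simp [Finset.sum_range_succ, add_assoc]

theorem pvB_inner (s o : List Char) (k : Int) (hk : 1 ≤ k) (i : ℕ) (hi : k.toNat ≤ i + 1) :
    (List.range k.toNat).foldl (fun (xy : Int × Int) (m : Nat) =>
      let c := s.getD ((i : Int) - k + 1 + (m : Int)).toNat ' '
      let x := if c = o.getD 2 ' ' ∨ c = o.getD 3 ' ' then xy.1 + 2 ^ m else xy.1
      let y := if c = o.getD 0 ' ' ∨ c = o.getD 3 ' ' then xy.2 + 2 ^ m else xy.2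
      (x, y)) ((0 : ℤ), (0 : ℤ))
    = (pvX s o k.toNat (i + 1), pvY s o k.toNat (i + 1)) := by
  have hidx : ∀ m : ℕ, ((i : ℤ) - k + 1 + (m : ℤ)).toNat = i + 1 + m - k.toNat := by
    intro m; omega
  have hstep : (fun (xy : Int × Int) (m : Nat) =>
      let c := s.getD ((i : Int) - k + 1 + (m : Int)).toNat ' '
      let x := if c = o.getD 2 ' ' ∨ c = o.getD 3 ' ' then xy.1 + 2 ^ m else xy.1
      let y := if c = o.getD 0 ' ' ∨ c = o.getD 3 ' ' then xy.2 + 2 ^ m else xy.2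
      (x, y))
    = (fun (xy : Int × Int) (m : Nat) =>
      (xy.1 + (if s.getD (i + 1 + m - k.toNat) ' ' = o.getD 2 ' ' ∨
                  s.getD (i + 1 + m - k.toNat) ' ' = o.getD 3 ' ' then (2 : ℤ) ^ m else 0),
       xy.2 + (if s.getD (i + 1 + m - k.toNat) ' ' = o.getD 0 ' ' ∨
                  s.getD (i + 1 + m - k.toNat) ' ' = o.getD 3 ' ' then (2 : ℤ) ^ m else 0))) := by
    funext xy m
    simp only [hidx, pvIte_add]
  rw [hstep, pvFoldl_pair_add]
  unfold pvX pvY pvWS pvIT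
  simp only [show ¬(i + 1 < k.toNat) from by omega, if_false, zero_add, Prod.mk.injEq]
  constructor <;>
    · apply Finset.sum_congr rfl
      intro m _
      exact if_congr (Iff.intro (fun h => ⟨by omega, h⟩) And.right) rfl rfl

theorem pvB_fold (s o : List Char) (k : Int) (hk : 1 ≤ k) (w : List (List Int)) (n : ℕ) :
    (PySem.List.pyRange (k - 1) (n : Int) 1).foldl (fun out i =>
      let xy := (List.range k.toNat).foldl (fun (xy : Int × Int) (m : Nat) =>
        let c := s.getD ((i : Int) - k + 1 + (m : Int)).toNat ' '
        let x := if c = o.getD 2 ' ' ∨ c = o.getD 3 ' ' then xy.1 + 2 ^ m else xy.1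
        let y := if c = o.getD 0 ' ' ∨ c = o.getD 3 ' ' then xy.2 + 2 ^ m else xy.2
        (x, y)) (0, 0)
      pvBump out xy.2 xy.1) w
    = pvOutF s o k.toNat w n := by
  induction n with
  | zero =>
      rw [PySem.List.pyRange_one_eq_nil (by omega)]
      simp [pvOutF]
  | succ n ih =>
      have hcast : ((n + 1 : ℕ) : ℤ) = (n : ℤ) + 1 := by push_cast; ring
      by_cases hc : k.toNat ≤ n + 1
      · rw [hcast, PySem.List.pyRange_one_succ_right (by omega : k - 1 ≤ (n : ℤ)),
          List.foldl_append, ih]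
        simp only [List.foldl_cons, List.foldl_nil]
        rw [pvB_inner s o k hk n hc]
        unfold pvOutF
        rw [List.range_succ, List.foldl_append]
        simp only [List.foldl_cons, List.foldl_nil]
        rw [if_pos hc]
      · rw [hcast, PySem.List.pyRange_one_eq_nil (by omega)]
        simp only [List.foldl_nil]
        rw [pvOutF_id s o k.toNat w (n + 1) (by omega)]

-- ===== VERDICT (by name: the statement is the Claim_ definition above) =====
theorem cgr_spec : Claim_equal_cgr := by
  intro seq order k _ hpre
  obtain ⟨hk, -⟩ := hpre
  unfold Spec_cgr cgr cgr_alt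
  simp only
  rw [pvA_fold seq.toList order.toList k hk _ seq.toList.length]
  rw [pvB_fold seq.toList order.toList k hk _ seq.toList.length]
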